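-- pv_equiv track=rewrite | github.com/zghhui/MaskFocus | src/maskfocus/src/open_r1/grpo.py | make_detection_prompt
-- ===== SOURCE A (Python) =====
-- def make_detection_prompt(nouns):
--     if len(nouns) == 0:
--         return '', []
--
--     token_spans = []
--     pointer = 0
--     for noun in nouns:
--         n_split = noun.strip().split(" ")
--         if len(n_split) == 1:
--             length = len(n_split[0])
--             token_spans.append([[pointer, pointer + length]])
--             pointer += length + 3 # on the blank space after the noun
--         else: # multiple words
--             beg_len = len(n_split[0])
--             total_length = len(noun)
--             end_len = len(n_split[-1])
--             token_spans.append([[pointer, pointer + beg_len], [pointer + total_length - end_len, pointer + total_length]])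
--             pointer += total_length + 3 # on the blank space after the noun
--     text_prompt = ' . '.join(nouns) + "." # need to end with '.
--     return text_prompt, token_spans
-- ===== SOURCE B (Python) =====
-- def make_detection_prompt(nouns):
--     if not nouns:
--         return '', []
--     # per-noun span width: stripped first-word length for single-word nouns,
--     # raw len(noun) for multi-word nouns (same rules as the original)
--     widths = []
--     for noun in nouns:
--         parts = noun.strip().split(" ")
--         widths.append(len(parts[0]) if len(parts) == 1 else len(noun))
--     # starting offsets as a prefix-sum table over (width + 3), seeded at 0
--     starts = [0]
--     for w in widths[:-1]:
--         starts.append(starts[-1] + w + 3)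
--     token_spans = []
--     for noun, (start, w) in zip(nouns, zip(starts, widths)):
--         parts = noun.strip().split(" ")
--         if len(parts) == 1:
--             token_spans.append([[start, start + w]])
--         else:
--             token_spans.append([[start, start + len(parts[0])],
--                                 [start + w - len(parts[-1]), start + w]])
--     return ' . '.join(nouns) + '.', token_spans
-- ===== Notes on version B (the rewrite author's own statement) =====
-- stated objective: alternative
-- what changed: Replaces the single loop threading a running pointer with a width table plus a prefix-sum table of starting offsets and a separate zip/map pass producing the spans.
import Mathlib
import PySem

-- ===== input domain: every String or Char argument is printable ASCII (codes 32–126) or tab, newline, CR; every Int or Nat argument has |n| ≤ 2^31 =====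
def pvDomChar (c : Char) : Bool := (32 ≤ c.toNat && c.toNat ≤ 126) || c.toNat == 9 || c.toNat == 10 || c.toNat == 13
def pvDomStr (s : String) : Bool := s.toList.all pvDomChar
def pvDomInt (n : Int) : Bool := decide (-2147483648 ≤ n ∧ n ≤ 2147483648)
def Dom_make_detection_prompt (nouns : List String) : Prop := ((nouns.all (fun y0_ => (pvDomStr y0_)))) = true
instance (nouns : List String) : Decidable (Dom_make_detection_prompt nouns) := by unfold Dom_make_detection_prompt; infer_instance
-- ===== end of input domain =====

-- B replaces A's pointer-threading loop by a width table, a prefix-sum table of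
-- start offsets and a separate zip/map pass (objective: alternative decomposition).

-- ===== PORT A =====
-- noun.strip().split(" "): sep " " ≠ "" so Python never raises; split? is some here
def pvSplit (noun : String) : List String :=
  (PySem.Str.split? (PySem.Str.strip noun) " ").getD []

-- the loop body of A (token_spans, pointer are the threaded state)
def pvStepA (acc : List (List (List Int)) × Int) (noun : String) :
    List (List (List Int)) × Int :=
  let n_split := pvSplit noun
  if n_split.length == 1 then
    let length : Int := PySem.Str.len (n_split.getD 0 "")
    (acc.1 ++ [[[acc.2, acc.2 + length]]], acc.2 + (length + 3))
  else
    let beg_len : Int := PySem.Str.len (n_split.getD 0 "")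
    let total_length : Int := PySem.Str.len noun
    let end_len : Int := PySem.Str.len (n_split.getLastD "")
    (acc.1 ++ [[[acc.2, acc.2 + beg_len],
                [acc.2 + total_length - end_len, acc.2 + total_length]]],
     acc.2 + (total_length + 3))

def make_detection_prompt (nouns : List String) : String × List (List (List Int)) :=
  if nouns.length == 0 then ("", [])
  else
    let r := nouns.foldl pvStepA ([], 0)
    (PySem.Str.join "" [PySem.Str.join " . " nouns, "."], r.1)

-- ===== PORT B =====
def pvWidth (noun : String) : Int :=
  let parts := pvSplit noun
  if parts.length == 1 then PySem.Str.len (parts.getD 0 "") else PySem.Str.len noun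

def pvSpanOf (noun : String) (start w : Int) : List (List Int) :=
  let parts := pvSplit noun
  if parts.length == 1 then [[start, start + w]]
  else [[start, start + PySem.Str.len (parts.getD 0 "")],
        [start + w - PySem.Str.len (parts.getLastD ""), start + w]]

def make_detection_prompt_alt (nouns : List String) : String × List (List (List Int)) :=
  if nouns.length == 0 then ("", [])
  else
    let widths := nouns.map pvWidth
    let starts := widths.dropLast.foldl
      (fun (st : List Int) w => st ++ [st.getLastD 0 + w + 3]) [0]
    let token_spans := (nouns.zip (starts.zip widths)).map
      (fun p => pvSpanOf p.1 p.2.1 p.2.2)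
    (PySem.Str.join "" [PySem.Str.join " . " nouns, "."], token_spans)

-- ===== PRECONDITION & SPEC =====
def Spec_make_detection_prompt (nouns : List String) (out : String × List (List (List Int))) : Prop := out = make_detection_prompt_alt nouns
instance (nouns : List String) (out : String × List (List (List Int))) : Decidable (Spec_make_detection_prompt nouns out) := by unfold Spec_make_detection_prompt; infer_instance

-- ===== CLAIM (what is proved, stated in full; the proofs are below) =====
def Claim_equal_make_detection_prompt : Prop := ∀ (nouns : List String), Dom_make_detection_prompt nouns → Spec_make_detection_prompt nouns (make_detection_prompt nouns)

-- ===== LEMMAS AND PROOFS =====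

-- reference shape: spans of a noun list from a given pointer
def pvSpansFrom (p : Int) : List String → List (List (List Int))
  | [] => []
  | n :: rest => pvSpanOf n p (pvWidth n) :: pvSpansFrom (p + pvWidth n + 3) rest

-- reference prefix offsets
def pvPfx (p : Int) : List Int → List Int
  | [] => [p]
  | w :: ws => p :: pvPfx (p + w + 3) ws

lemma pvA_fold (nouns : List String) : ∀ (acc : List (List (List Int))) (p : Int),
    nouns.foldl pvStepA (acc, p)
    = (acc ++ pvSpansFrom p nouns, p + (nouns.map (fun n => pvWidth n + 3)).sum) := by
  induction nouns with
  | nil => intro acc p; simp [pvSpansFrom]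
  | cons n rest ih =>
    intro acc p
    rw [List.foldl_cons]
    have hb : pvStepA (acc, p) n
        = (acc ++ [pvSpanOf n p (pvWidth n)], p + (pvWidth n + 3)) := by
      cases h : ((pvSplit n).length == 1)
      · simp only [pvStepA, pvSpanOf, pvWidth, h, if_false, Bool.false_eq_true]
      · simp only [pvStepA, pvSpanOf, pvWidth, h, if_true]
    rw [hb, ih]
    simp only [pvSpansFrom, List.map_cons, List.sum_cons, List.append_assoc,
      List.singleton_append]
    rw [show p + (pvWidth n + 3) = p + pvWidth n + 3 from by ring]
    rw [show p + (pvWidth n + 3 + (List.map (fun n => pvWidth n + 3) rest).sum)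
        = p + pvWidth n + 3 + (List.map (fun n => pvWidth n + 3) rest).sum from by ring]

lemma pvStarts_fold (ws : List Int) : ∀ (st : List Int) (p : Int),
    ws.foldl (fun (st : List Int) w => st ++ [st.getLastD 0 + w + 3]) (st ++ [p])
      = st ++ pvPfx p ws := by
  induction ws with
  | nil => intro st p; simp [pvPfx]
  | cons w ws ih =>
    intro st p
    simp only [List.foldl_cons, pvPfx]
    have : (st ++ [p]).getLastD 0 = p := by simp
    rw [this, List.append_assoc]
    have h2 := ih (st ++ [p]) (p + w + 3)
    simpa [List.append_assoc] using h2

lemma pvZip_map (nouns : List String) : ∀ p : Int,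
    (nouns.zip ((pvPfx p (nouns.map pvWidth).dropLast).zip (nouns.map pvWidth))).map
      (fun q => pvSpanOf q.1 q.2.1 q.2.2) = pvSpansFrom p nouns := by
  induction nouns with
  | nil => intro p; simp [pvSpansFrom, pvPfx]
  | cons n rest ih =>
    intro p
    cases rest with
    | nil => simp [pvSpansFrom, pvPfx]
    | cons m rest' =>
      have hdl : ((n :: m :: rest').map pvWidth).dropLast
          = pvWidth n :: ((m :: rest').map pvWidth).dropLast := by
        simp [List.dropLast_cons_of_ne_nil]
      rw [hdl]
      simp only [pvPfx, List.map_cons, List.zip_cons_cons, pvSpansFrom]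
      have h2 := ih (p + pvWidth n + 3)
      simp only [List.map_cons] at h2
      rw [h2]
      simp only [pvSpansFrom]

-- ===== VERDICT (by name: the statement is the Claim_ definition above) =====
theorem make_detection_prompt_spec : Claim_equal_make_detection_prompt := by
  intro nouns _
  unfold Spec_make_detection_prompt make_detection_prompt make_detection_prompt_alt
  by_cases h : nouns.length == 0
  · simp [h]
  · simp only [h, if_neg, Bool.false_eq_true, not_false_iff]
    have hA := pvA_fold nouns [] 0
    rw [hA]
    have hS := pvStarts_fold (nouns.map pvWidth).dropLast [] 0
    simp only [List.nil_append] at hS ⊢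
    rw [hS, pvZip_map nouns 0]
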